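-- pv_equiv track=rewrite | github.com/candy-1107/ProtonGAN | Generator.py | get_kernel_size
-- ===== SOURCE A (Python) =====
-- def get_kernel_size(max_seq_length):
--     length = 6 * 2**6
--     padding = 0
--     kernel_size = 0
--     while kernel_size <= 0:
--         kernel_size = length - max_seq_length + 2 * padding + 1
--         padding += 1
--
--     return kernel_size, padding-1
-- ===== SOURCE B (Python) =====
-- def get_kernel_size(max_seq_length):
--     # Closed form: smallest padding p >= 0 with 384 - max_seq_length + 2p + 1 > 0.
--     padding = max(0, -((384 - max_seq_length) // 2))
--     return 384 - max_seq_length + 2 * padding + 1, padding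
-- ===== Notes on version B (the rewrite author's own statement) =====
-- stated objective: faster
-- what changed: Replaced the linear search loop over padding values with closed-form arithmetic: padding = max(0, ceil((max_seq_length-384)/2)), computed with one floor division.
import Mathlib
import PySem

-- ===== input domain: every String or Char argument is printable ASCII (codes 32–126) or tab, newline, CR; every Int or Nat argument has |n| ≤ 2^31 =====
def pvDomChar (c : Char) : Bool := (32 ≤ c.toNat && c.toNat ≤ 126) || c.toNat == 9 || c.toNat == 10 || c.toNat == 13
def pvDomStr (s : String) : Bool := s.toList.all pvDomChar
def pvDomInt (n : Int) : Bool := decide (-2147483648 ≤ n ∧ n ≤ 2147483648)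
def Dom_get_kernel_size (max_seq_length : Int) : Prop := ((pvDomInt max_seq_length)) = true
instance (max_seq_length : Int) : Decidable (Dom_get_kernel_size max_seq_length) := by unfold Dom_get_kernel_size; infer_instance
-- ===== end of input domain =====

-- B replaces A's linear padding search with closed-form arithmetic (one floor division); O(1) instead of O(max_seq_length).


-- ===== PORT A =====
-- A's while loop: recompute kernel_size and bump padding until kernel_size > 0;
-- returns (kernel_size, padding - 1). Ported with a Nat fuel argument that only
-- makes the recursion structural; get_kernel_size supplies enough fuel that the
-- zero-fuel branch is never reached (kernel_size grows by 2 per iteration).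
def get_kernel_size_loopA (fuel : Nat) (length max_seq_length padding : Int) : List Int :=
  match fuel with
  | 0 => []
  | fuel + 1 =>
    let kernel_size := length - max_seq_length + 2 * padding + 1
    if kernel_size ≤ 0 then
      get_kernel_size_loopA fuel length max_seq_length (padding + 1)
    else
      [kernel_size, padding]

def get_kernel_size (max_seq_length : Int) : List Int :=
  let length : Int := 6 * 2 ^ 6
  get_kernel_size_loopA (max_seq_length.toNat + 1) length max_seq_length 0

-- ===== PORT B =====
def get_kernel_size_alt (max_seq_length : Int) : List Int :=
  let padding := max 0 (-(PySem.Int.floordiv (384 - max_seq_length) 2))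
  [384 - max_seq_length + 2 * padding + 1, padding]

-- ===== PRECONDITION & SPEC =====
def Spec_get_kernel_size (max_seq_length : Int) (out : List Int) : Prop := out = get_kernel_size_alt max_seq_length
instance (max_seq_length : Int) (out : List Int) : Decidable (Spec_get_kernel_size max_seq_length out) := by unfold Spec_get_kernel_size; infer_instance

-- ===== CLAIM (what is proved, stated in full; the proofs are below) =====
def Claim_equal_get_kernel_size : Prop := ∀ (max_seq_length : Int), Dom_get_kernel_size max_seq_length → Spec_get_kernel_size max_seq_length (get_kernel_size max_seq_length)

-- ===== LEMMAS AND PROOFS =====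

theorem fdiv_two_bounds (x : Int) : 2 * (x.fdiv 2) ≤ x ∧ x < 2 * (x.fdiv 2) + 2 := by
  have h1 := Int.mul_fdiv_add_fmod x 2
  have h2 : x.fmod 2 = x % 2 + if (0:Int) ≤ 2 ∨ (2:Int) ∣ x then 0 else 2 := Int.fmod_eq_emod
  simp at h2
  omega

-- With sufficient fuel, the loop starting at padding p returns [385 - m + 2p', p']
-- where p' = max p c and c = ceil((m - 384)/2) is the least padding making the
-- kernel positive.
theorem loopA_closed (fuel : Nat) (m p : Int)
    (hfuel : -((384 - m).fdiv 2) - p < (fuel : Int) ∧ 0 < fuel) :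
    get_kernel_size_loopA fuel 384 m p =
      [384 - m + 2 * max p (-((384 - m).fdiv 2)) + 1,
       max p (-((384 - m).fdiv 2))] := by
  have hb := fdiv_two_bounds (384 - m)
  induction fuel generalizing p with
  | zero => exact absurd hfuel.2 (by omega)
  | succ fuel ih =>
    simp only [get_kernel_size_loopA]
    split
    · rename_i hk
      rw [ih (p + 1) ⟨by have := hfuel.1; push_cast at this ⊢; omega, by omega⟩]
      have : max (p + 1) (-((384 - m).fdiv 2)) = max p (-((384 - m).fdiv 2)) := by omega
      rw [this]
    · rename_i hk
      have : max p (-((384 - m).fdiv 2)) = p := by omega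
      rw [this]

-- ===== VERDICT (by name: the statement is the Claim_ definition above) =====
theorem get_kernel_size_spec : Claim_equal_get_kernel_size := by
  intro m _
  unfold Spec_get_kernel_size get_kernel_size get_kernel_size_alt
  have hb := fdiv_two_bounds (384 - m)
  show get_kernel_size_loopA (m.toNat + 1) 384 m 0 = _
  rw [loopA_closed (m.toNat + 1) m 0 ⟨by push_cast; omega, by omega⟩]
  simp only [PySem.Int.floordiv]
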